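-- pv_equiv track=rewrite | github.com/diegolazareno/CDIN | Ciencia de datos/Code/Clases/1. Minería de datos/Clase 8.py | ceros_ssn
-- ===== SOURCE A (Python) =====
-- def ceros_ssn(x):
--     try:
--         x=str(x)
--         while (len(x)<10):
--             x="0"+x
--     except:
--         pass
--     return x
-- ===== SOURCE B (Python) =====
-- def ceros_ssn(x):
--     try:
--         x = str(x)
--         x = "0" * (10 - len(x)) + x
--     except:
--         pass
--     return x
-- ===== Notes on version B (the rewrite author's own statement) =====
-- stated objective: simpler
-- what changed: Replaces the while loop that prepends '0' one character at a time with a single closed-form padding '0'*(10-len(x))+x.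
import Mathlib
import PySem

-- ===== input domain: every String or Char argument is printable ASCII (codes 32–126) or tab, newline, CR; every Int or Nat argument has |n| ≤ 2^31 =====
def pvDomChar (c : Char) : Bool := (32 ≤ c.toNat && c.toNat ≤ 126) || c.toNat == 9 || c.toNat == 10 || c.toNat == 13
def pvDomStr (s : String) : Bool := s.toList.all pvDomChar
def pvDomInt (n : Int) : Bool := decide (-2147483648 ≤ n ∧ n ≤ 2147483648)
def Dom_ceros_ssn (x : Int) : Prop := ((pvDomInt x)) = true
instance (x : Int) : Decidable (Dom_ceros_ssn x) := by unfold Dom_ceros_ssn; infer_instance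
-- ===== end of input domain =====

-- B replaces A's character-by-character while loop with one closed-form padding (simpler).

-- ===== PORT A =====
-- the while loop: while len(x) < 10: x = "0" + x
def cerosLoop (s : List Char) : List Char :=
  if s.length < 10 then cerosLoop ('0' :: s) else s
termination_by 10 - s.length

def ceros_ssn (x : Int) : String :=
  String.mk (cerosLoop (PySem.Int.toChars x))

-- ===== PORT B =====
-- x = "0" * (10 - len(x)) + x  (Python's negative repeat count yields "", matching Nat truncation)
def ceros_ssn_alt (x : Int) : String :=
  let s := PySem.Int.toChars x
  String.mk (List.replicate (10 - s.length) '0' ++ s)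

-- ===== PRECONDITION & SPEC =====
def Spec_ceros_ssn (x : Int) (out : String) : Prop := out = ceros_ssn_alt x
instance (x : Int) (out : String) : Decidable (Spec_ceros_ssn x out) := by unfold Spec_ceros_ssn; infer_instance

-- ===== CLAIM (what is proved, stated in full; the proofs are below) =====
def Claim_equal_ceros_ssn : Prop := ∀ (x : Int), Dom_ceros_ssn x → Spec_ceros_ssn x (ceros_ssn x)

-- ===== LEMMAS AND PROOFS =====
theorem cerosLoop_eq (s : List Char) :
    cerosLoop s = List.replicate (10 - s.length) '0' ++ s := by
  by_cases h : s.length < 10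
  · rw [cerosLoop, if_pos h, cerosLoop_eq ('0' :: s)]
    have : 10 - s.length = (10 - (('0' :: s).length)) + 1 := by
      simp only [List.length_cons]; omega
    rw [this, List.replicate_succ']
    simp
  · rw [cerosLoop, if_neg h]
    have : 10 - s.length = 0 := by omega
    simp [this]
termination_by 10 - s.length

-- ===== VERDICT (by name: the statement is the Claim_ definition above) =====
theorem ceros_ssn_spec : Claim_equal_ceros_ssn := by
  intro x _
  unfold Spec_ceros_ssn ceros_ssn ceros_ssn_alt
  rw [cerosLoop_eq]
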